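-- pv_equiv track=rewrite | github.com/nickchen111/Advent_Of_Code_2024 | aoc_01.py | process_input_data
-- ===== SOURCE A (Python) =====
-- def process_input_data(input_data):
--     column1 = []
--     column2 = []
--     for line in input_data.strip().split("\n"):
--         nums = list(map(int, line.split()))
--         if len(nums) == 2:  # 假設每行有兩個數字
--             column1.append(nums[0])
--             column2.append(nums[1])
--     return column1, column2
-- ===== SOURCE B (Python) =====
-- def process_input_data(input_data):
--     flat = [n
--             for line in input_data.strip().split("\n")
--             if len(nums := [int(t) for t in line.split()]) == 2
--             for n in nums]
--     return flat[0::2], flat[1::2]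
-- ===== Notes on version B (the rewrite author's own statement) =====
-- stated objective: alternative
-- what changed: B builds ONE interleaved flat list of all numbers of the valid two-number lines (a nested comprehension) and then extracts the two columns by stride slicing flat[0::2] / flat[1::2], instead of A's two parallel column lists appended during the scan; Pre_ excludes inputs where a whitespace token is not a valid int literal, on which both programs raise ValueError.
import Mathlib
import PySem

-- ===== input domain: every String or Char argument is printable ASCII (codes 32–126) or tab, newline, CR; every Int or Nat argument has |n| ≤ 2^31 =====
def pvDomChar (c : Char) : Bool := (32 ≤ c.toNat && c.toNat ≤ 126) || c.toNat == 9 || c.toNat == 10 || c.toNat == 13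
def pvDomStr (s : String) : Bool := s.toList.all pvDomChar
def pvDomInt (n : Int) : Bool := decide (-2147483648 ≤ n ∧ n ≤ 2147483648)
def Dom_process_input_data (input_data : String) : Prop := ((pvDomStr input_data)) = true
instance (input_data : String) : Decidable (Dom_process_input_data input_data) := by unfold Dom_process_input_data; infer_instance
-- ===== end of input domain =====

-- B flattens all numbers of the valid lines into ONE interleaved list and extracts the two
-- columns by stride slicing (flat[0::2], flat[1::2]); A keeps two parallel column lists.

-- shared per-line parsing: the ints of a line's whitespace tokens (Pre_ guarantees each parses)
def pvNums (line : String) : List Int :=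
  (PySem.Str.split₀ line).map (fun t => (PySem.Int.ofStr? t).getD 0)

-- ===== PORT A =====
-- the body of A's for-loop, as a named step function
def pvStepA (acc : List Int × List Int) (line : String) : List Int × List Int :=
  let nums := pvNums line
  if nums.length = 2 then
    (acc.1 ++ [(PySem.List.pyGet? nums 0).getD 0],
     acc.2 ++ [(PySem.List.pyGet? nums 1).getD 0])
  else acc

def process_input_data (input_data : String) : List Int × List Int :=
  ((PySem.Str.split? (PySem.Str.strip input_data) "\n").getD []).foldl pvStepA ([], [])

-- ===== PORT B =====
-- the nested comprehension: every int of every line with exactly two whitespace tokens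
def pvFlat (lines : List String) : List Int :=
  lines.flatMap (fun line =>
    if (pvNums line).length = 2 then pvNums line else [])

def process_input_data_alt (input_data : String) : List Int × List Int :=
  let flat := pvFlat ((PySem.Str.split? (PySem.Str.strip input_data) "\n").getD [])
  ((PySem.List.slice? flat (some 0) none 2).getD [],
   (PySem.List.slice? flat (some 1) none 2).getD [])

-- ===== PRECONDITION & SPEC =====
-- Pre_ excludes exactly the inputs on which Python A raises ValueError: some whitespace
-- token of some line is not a valid int literal.
def Pre_process_input_data (input_data : String) : Prop :=
  ∀ line ∈ (PySem.Str.split? (PySem.Str.strip input_data) "\n").getD [],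
    ∀ t ∈ PySem.Str.split₀ line, (PySem.Int.ofStr? t).isSome = true
instance (input_data : String) : Decidable (Pre_process_input_data input_data) := by
  unfold Pre_process_input_data; infer_instance

def pvWitness_process_input_data : String := "3 4\n5 6"

def Spec_process_input_data (input_data : String) (out : List Int × List Int) : Prop := out = process_input_data_alt input_data
instance (input_data : String) (out : List Int × List Int) : Decidable (Spec_process_input_data input_data out) := by unfold Spec_process_input_data; infer_instance

-- ===== CLAIM (what is proved, stated in full; the proofs are below) =====
def Claim_equal_process_input_data : Prop := ∀ (input_data : String), Dom_process_input_data input_data → Pre_process_input_data input_data → Spec_process_input_data input_data (process_input_data input_data)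

-- ===== LEMMAS AND PROOFS =====

-- the even-index and odd-index elements of a list
def pvEvens : List Int → List Int
  | [] => []
  | [a] => [a]
  | a :: _ :: t => a :: pvEvens t

def pvOdds : List Int → List Int
  | [] => []
  | [_] => []
  | _ :: b :: t => b :: pvOdds t

lemma evensAux (xs : List Int) :
    (List.range ((xs.length + 1)/2)).filterMap (fun k => xs[2*k]?) = pvEvens xs := by
  induction xs using pvEvens.induct with
  | case1 => simp [pvEvens]
  | case2 a => simp [pvEvens]
  | case3 a b t ih =>
    have hlen : ((a :: b :: t).length + 1)/2 = (t.length + 1)/2 + 1 := by simp; omega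
    rw [hlen, List.range_succ_eq_map, List.filterMap_cons, List.filterMap_map]
    simp only [Function.comp]
    have hsh : ∀ k : Nat, (a :: b :: t)[2*(k+1)]? = t[2*k]? := by
      intro k
      have h2 : 2*(k+1) = 2*k + 1 + 1 := by omega
      rw [h2]; simp
    simp only [hsh]
    simpa [pvEvens] using ih

lemma oddsAux (xs : List Int) :
    (List.range (xs.length/2)).filterMap (fun k => xs[2*k+1]?) = pvOdds xs := by
  induction xs using pvOdds.induct with
  | case1 => simp [pvOdds]
  | case2 a => simp [pvOdds]
  | case3 a b t ih =>
    have hlen : (a :: b :: t).length/2 = t.length/2 + 1 := by simp; omega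
    rw [hlen, List.range_succ_eq_map, List.filterMap_cons, List.filterMap_map]
    simp only [Function.comp]
    have hsh : ∀ k : Nat, (a :: b :: t)[2*(k+1)+1]? = t[2*k+1]? := by
      intro k
      have h2 : 2*(k+1)+1 = (2*k+1) + 1 + 1 := by omega
      rw [h2]; simp
    simp only [hsh]
    simpa [pvOdds] using ih

-- xs[0::2] is the even-index elements
lemma sliceEvens (xs : List Int) :
    PySem.List.slice? xs (some 0) none 2 = some (pvEvens xs) := by
  rw [← evensAux]
  simp only [PySem.List.slice?, PySem.List.sliceIndices]
  norm_num
  have hc : (if 0 < xs.length then (((xs.length : Int) + 2 - 1) / 2).toNat else 0)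
      = (xs.length + 1)/2 := by
    split_ifs with h <;> omega
  rw [hc]
  apply List.filterMap_congr
  intro k _
  congr 1

-- xs[1::2] is the odd-index elements
lemma sliceOdds (xs : List Int) :
    PySem.List.slice? xs (some 1) none 2 = some (pvOdds xs) := by
  rw [← oddsAux]
  simp only [PySem.List.slice?, PySem.List.sliceIndices]
  norm_num
  rcases Nat.eq_zero_or_pos xs.length with h | h
  · simp [h]
  · have h1 : min 1 (xs.length : Int) = 1 := by omega
    rw [h1]
    have hc : (if 1 < xs.length then (((xs.length : Int) - 1 + 2 - 1) / 2).toNat else 0)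
        = xs.length/2 := by
      split_ifs with h2 <;> omega
    rw [hc]
    apply List.filterMap_congr
    intro k _
    congr 1
    omega

-- A's foldl over the lines, from any accumulator, appends exactly the even- and odd-index
-- elements of B's interleaved flat list.
lemma pv_foldl_eq (lines : List String) (c1 c2 : List Int) :
    lines.foldl pvStepA (c1, c2)
      = (c1 ++ pvEvens (pvFlat lines), c2 ++ pvOdds (pvFlat lines)) := by
  induction lines generalizing c1 c2 with
  | nil => simp [pvFlat, pvEvens, pvOdds]
  | cons line rest ih =>
    rw [List.foldl_cons]
    have hflat : pvFlat (line :: rest)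
        = (if (pvNums line).length = 2 then pvNums line else []) ++ pvFlat rest := by
      simp [pvFlat]
    rcases h : pvNums line with _ | ⟨a, _ | ⟨b, _ | ⟨c, tl⟩⟩⟩ <;>
      simp [pvStepA, hflat, h, ih, pvEvens, pvOdds, PySem.List.pyGet?, PySem.List.pyIdx?]

theorem pv_main (input_data : String) :
    process_input_data input_data = process_input_data_alt input_data := by
  unfold process_input_data process_input_data_alt
  simp only []
  rw [pv_foldl_eq, sliceEvens, sliceOdds]
  simp

-- ===== VERDICT (by name: the statement is the Claim_ definition above) =====
theorem process_input_data_spec : Claim_equal_process_input_data := by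
  intro s _ _
  unfold Spec_process_input_data
  exact pv_main s
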